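-- pv_equiv track=rewrite | github.com/gfkpth/bert-apc-trainer | code/classes.py | generate_biolabels_single
-- ===== SOURCE A (Python) =====
-- def generate_biolabels_single(sentence_tokens, apc_tokens):
--     """
--     Given tokenized sentence and tokenized APC, return BIO labels for sentence.
--     All instances of the same APC in the same sentence are marked, i.e. we can capture repetitions appropriately.
--     In line with what the base dataset annotation provides, however, this only works for one specific APC.
--     """
--     if not sentence_tokens or not apc_tokens:
--         return ["O"] * len(sentence_tokens) if sentence_tokens else []
--
--     labels = ["O"] * len(sentence_tokens)
--     sentence_tokens_lower = [t.lower() for t in sentence_tokens]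
--     apc_tokens_lower = [t.lower() for t in apc_tokens]
--
--     # Check if we have enough tokens left to match
--     for i in range(len(sentence_tokens_lower) - len(apc_tokens_lower) + 1):
--         if sentence_tokens_lower[i:i+len(apc_tokens_lower)] == apc_tokens_lower:
--             labels[i] = "B-APC"
--             for j in range(1, len(apc_tokens_lower)):
--                 if i + j < len(labels):  # Safety check
--                     labels[i + j] = "I-APC"
--
--     return labels
-- ===== SOURCE B (Python) =====
-- def generate_biolabels_single(sentence_tokens, apc_tokens):
--     """Single forward pass with a carry counter instead of label-array rewriting."""
--     sl = [t.lower() for t in sentence_tokens]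
--     pl = [t.lower() for t in apc_tokens]
--     if not pl:
--         return ["O"] * len(sl)
--     m = len(pl)
--     last = len(sl) - m  # no occurrence can start after this position
--     labels = []
--     carry = 0
--     for k in range(len(sl)):
--         if k <= last and sl[k:k + m] == pl:
--             labels.append("B-APC")
--             carry = m - 1
--         elif carry > 0:
--             labels.append("I-APC")
--             carry -= 1
--         else:
--             labels.append("O")
--     return labels
-- ===== Notes on version B (the rewrite author's own statement) =====
-- stated objective: simpler
-- what changed: A rewrites a preallocated label array occurrence-by-occurrence (a 'B-APC' write plus an inner loop of 'I-APC' writes, later occurrences overwriting earlier ones); B builds the labels in one forward pass with a carry counter of pending 'I-APC' positions, with no mutation and no inner write loop.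
import Mathlib
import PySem

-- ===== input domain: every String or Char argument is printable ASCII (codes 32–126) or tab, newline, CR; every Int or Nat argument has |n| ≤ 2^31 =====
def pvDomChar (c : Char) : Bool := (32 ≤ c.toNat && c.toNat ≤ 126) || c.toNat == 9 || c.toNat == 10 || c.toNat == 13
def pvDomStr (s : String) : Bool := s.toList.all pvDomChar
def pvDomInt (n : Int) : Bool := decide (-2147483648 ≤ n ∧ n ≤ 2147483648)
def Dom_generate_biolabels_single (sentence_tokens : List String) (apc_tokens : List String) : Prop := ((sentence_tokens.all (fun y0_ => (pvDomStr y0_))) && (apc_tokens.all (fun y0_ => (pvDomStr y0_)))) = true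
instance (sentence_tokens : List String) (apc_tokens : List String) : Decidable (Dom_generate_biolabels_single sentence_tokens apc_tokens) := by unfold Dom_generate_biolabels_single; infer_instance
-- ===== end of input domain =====

-- B replaces A's occurrence-by-occurrence rewriting of a label array by a single
-- forward pass with a carry counter (simpler: no mutation, no inner write loop).

-- ===== PORT A =====
-- labels[i] = "B-APC"; for j in range(1, m): if i+j < len(labels): labels[i+j] = "I-APC"
def pvApplyOcc (labels : List String) (i m : Nat) : List String :=
  (List.range' 1 (m - 1)).foldl
    (fun ls j => if i + j < ls.length then ls.set (i + j) "I-APC" else ls)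
    (labels.set i "B-APC")

def generate_biolabels_single (sentence_tokens : List String) (apc_tokens : List String) : List String :=
  if sentence_tokens = [] ∨ apc_tokens = [] then
    (if sentence_tokens = [] then [] else List.replicate sentence_tokens.length "O")
  else
    let sl := sentence_tokens.map PySem.Str.lower
    let pl := apc_tokens.map PySem.Str.lower
    (List.range (sentence_tokens.length + 1 - apc_tokens.length)).foldl
      (fun labels i =>
        if (sl.drop i).take pl.length = pl then pvApplyOcc labels i pl.length else labels)
      (List.replicate sentence_tokens.length "O")

-- ===== PORT B =====
def generate_biolabels_single_alt (sentence_tokens : List String) (apc_tokens : List String) : List String :=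
  let sl := sentence_tokens.map PySem.Str.lower
  let pl := apc_tokens.map PySem.Str.lower
  if pl = [] then List.replicate sl.length "O"
  else
    -- Python's 'last = len(sl) - m; ... k <= last' bound, written inline
    ((List.range sl.length).foldl
      (fun (st : List String × Nat) (k : Nat) =>
        if (k : Int) ≤ (sl.length : Int) - (pl.length : Int) ∧ (sl.drop k).take pl.length = pl then (st.1 ++ ["B-APC"], pl.length - 1)
        else if 0 < st.2 then (st.1 ++ ["I-APC"], st.2 - 1)
        else (st.1 ++ ["O"], st.2))
      ([], 0)).1

-- ===== PRECONDITION & SPEC =====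
def Spec_generate_biolabels_single (sentence_tokens : List String) (apc_tokens : List String) (out : List String) : Prop := out = generate_biolabels_single_alt sentence_tokens apc_tokens
instance (sentence_tokens : List String) (apc_tokens : List String) (out : List String) : Decidable (Spec_generate_biolabels_single sentence_tokens apc_tokens out) := by unfold Spec_generate_biolabels_single; infer_instance

-- ===== CLAIM (what is proved, stated in full; the proofs are below) =====
def Claim_equal_generate_biolabels_single : Prop := ∀ (sentence_tokens : List String) (apc_tokens : List String), Dom_generate_biolabels_single sentence_tokens apc_tokens → Spec_generate_biolabels_single sentence_tokens apc_tokens (generate_biolabels_single sentence_tokens apc_tokens)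

-- ===== LEMMAS AND PROOFS =====

-- occurrence test at position i (on the lowered lists)
def pvOccB (sl pl : List String) (i : Nat) : Bool := (sl.drop i).take pl.length == pl

-- final label of position k (both programs compute this)
def pvLab (sl pl : List String) (k : Nat) : String :=
  if pvOccB sl pl k = true then "B-APC"
  else if ∃ i, i < k ∧ pvOccB sl pl i = true ∧ k < i + pl.length then "I-APC"
  else "O"

-- label of position k after A has processed all occurrence starts < t
def pvLabA (sl pl : List String) (t k : Nat) : String :=
  if pvOccB sl pl k = true ∧ k < t then "B-APC"
  else if ∃ i, i < t ∧ pvOccB sl pl i = true ∧ i < k ∧ k < i + pl.length then "I-APC"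
  else "O"

-- B's carry counter after processing positions < t
def pvCarry (sl pl : List String) : Nat → Nat
  | 0 => 0
  | t + 1 => if pvOccB sl pl t then pl.length - 1 else pvCarry sl pl t - 1

theorem pvOccB_bound {sl pl : List String} {i : Nat} (hpl : pl ≠ []) (h : pvOccB sl pl i = true) :
    i + pl.length ≤ sl.length := by
  have hm : 0 < pl.length := by cases pl with
    | nil => exact absurd rfl hpl
    | cons x xs => simp
  unfold pvOccB at h
  have h' := congrArg List.length (beq_iff_eq.mp h)
  simp [List.length_take, List.length_drop] at h'
  omega

theorem pvApplyOcc_get? (L : List String) (i m k : Nat) (hm : 1 ≤ m) (h : i + m ≤ L.length) :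
    (pvApplyOcc L i m)[k]? =
      if k = i then some "B-APC"
      else if i < k ∧ k < i + m then some "I-APC"
      else L[k]? := by
  have aux : ∀ (r : Nat) (L0 : List String), i + 1 + r ≤ L0.length →
      ((List.range' 1 r).foldl (fun ls j => if i + j < ls.length then ls.set (i + j) "I-APC" else ls) L0)[k]?
        = if i + 1 ≤ k ∧ k < i + 1 + r then some "I-APC" else L0[k]? := by
    intro r
    induction r with
    | zero =>
      intro L0 _
      simp only [List.range'_zero, List.foldl_nil]
      rw [if_neg (by omega)]
    | succ r ih =>
      intro L0 hL
      have hcat : List.range' 1 (r + 1) = List.range' 1 r ++ [1 + r] := by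
        rw [List.range'_concat]; simp
      have hlen : ∀ (l : List Nat) (L : List String),
          (l.foldl (fun ls j => if i + j < ls.length then ls.set (i + j) "I-APC" else ls) L).length
            = L.length := by
        intro l
        induction l with
        | nil => intro L; rfl
        | cons x xs ih2 =>
          intro L
          simp only [List.foldl_cons]
          rw [ih2]
          split <;> simp
      rw [hcat, List.foldl_append]
      simp only [List.foldl_cons, List.foldl_nil]
      rw [if_pos (by rw [hlen]; omega)]
      rw [List.getElem?_set]
      rw [hlen]
      rw [ih L0 (by omega)]
      have hilen : i + (1 + r) < L0.length := by omega
      split_ifs with h1 h2 h3 h4 h5 <;> first | rfl | omega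
  unfold pvApplyOcc
  rw [aux (m - 1) (L.set i "B-APC") (by simp; omega)]
  rw [List.getElem?_set]
  have hiL : i < L.length := by omega
  split_ifs with h1 h2 h3 h4 h5 h6 h7 <;> first | rfl | omega

theorem pvRange_get? (n k : Nat) : (List.range n)[k]? = if k < n then some k else none := by
  rcases Nat.lt_or_ge k n with h | h
  · rw [List.getElem?_eq_getElem (by simpa using h), List.getElem_range, if_pos h]
  · rw [List.getElem?_eq_none (by simpa using h), if_neg (by omega)]

theorem pvLabA_zero (sl pl : List String) (k : Nat) : pvLabA sl pl 0 k = "O" := by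
  unfold pvLabA
  rw [if_neg (by rintro ⟨_, h⟩; omega), if_neg (by rintro ⟨i, hi, _⟩; omega)]

theorem pvLabA_succ_eq (sl pl : List String) (t k : Nat)
    (h : pvOccB sl pl t = true → (k ≠ t ∧ ¬(t < k ∧ k < t + pl.length))) :
    pvLabA sl pl (t + 1) k = pvLabA sl pl t k := by
  unfold pvLabA
  have e1 : (pvOccB sl pl k = true ∧ k < t + 1) ↔ (pvOccB sl pl k = true ∧ k < t) := by
    constructor
    · rintro ⟨ho, hl⟩
      refine ⟨ho, ?_⟩
      by_cases hkt : k = t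
      · subst hkt; exact absurd rfl (h ho).1
      · omega
    · rintro ⟨ho, hl⟩; exact ⟨ho, by omega⟩
  have e2 : (∃ i, i < t + 1 ∧ pvOccB sl pl i = true ∧ i < k ∧ k < i + pl.length)
      ↔ (∃ i, i < t ∧ pvOccB sl pl i = true ∧ i < k ∧ k < i + pl.length) := by
    constructor
    · rintro ⟨i, hi, ho, hik, hk2⟩
      rcases (by omega : i < t ∨ i = t) with h' | h'
      · exact ⟨i, h', ho, hik, hk2⟩
      · subst h'; exact absurd ⟨hik, hk2⟩ (h ho).2
    · rintro ⟨i, hi, rest⟩; exact ⟨i, by omega, rest⟩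
  rw [if_congr e1 rfl (if_congr e2 rfl rfl)]

theorem pvAfold (sl pl : List String) (hpl : pl ≠ []) (t : Nat) :
    (List.range t).foldl
      (fun labels i => if (sl.drop i).take pl.length = pl then pvApplyOcc labels i pl.length else labels)
      (List.replicate sl.length "O")
    = (List.range sl.length).map (pvLabA sl pl t) := by
  have hm : 0 < pl.length := by
    cases pl with
    | nil => exact absurd rfl hpl
    | cons x xs => simp
  induction t with
  | zero =>
    simp only [List.range_zero, List.foldl_nil]
    apply List.ext_getElem?
    intro k
    simp only [List.getElem?_replicate, List.getElem?_map, pvRange_get?]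
    split_ifs <;> simp [pvLabA_zero]
  | succ t ih =>
    rw [List.range_succ, List.foldl_append, List.foldl_cons, List.foldl_nil, ih]
    by_cases hocc : pvOccB sl pl t = true
    · have hocc' : (sl.drop t).take pl.length = pl := by simpa [pvOccB] using hocc
      rw [if_pos hocc']
      have hb : t + pl.length ≤ sl.length := pvOccB_bound hpl hocc
      apply List.ext_getElem?
      intro k
      rw [pvApplyOcc_get? _ t pl.length k hm (by simp; omega)]
      by_cases hk : k < sl.length
      · by_cases hkt : k = t
        · rw [if_pos hkt]
          simp only [List.getElem?_map, pvRange_get?, if_pos hk, Option.map_some]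
          have hB : pvLabA sl pl (t + 1) k = "B-APC" := by
            unfold pvLabA; rw [if_pos ⟨by rw [hkt]; exact hocc, by omega⟩]
          rw [hB]
        · rw [if_neg hkt]
          by_cases hki : t < k ∧ k < t + pl.length
          · rw [if_pos hki]
            have hI : pvLabA sl pl (t + 1) k = "I-APC" := by
              unfold pvLabA
              rw [if_neg (by rintro ⟨_, h⟩; omega), if_pos ⟨t, by omega, hocc, hki.1, hki.2⟩]
            simp only [List.getElem?_map, pvRange_get?, if_pos hk, Option.map_some, hI]
          · rw [if_neg hki]
            simp only [List.getElem?_map, pvRange_get?, if_pos hk, Option.map_some]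
            rw [pvLabA_succ_eq sl pl t k (fun _ => ⟨hkt, hki⟩)]
      · rw [if_neg (by omega), if_neg (by omega)]
        simp only [List.getElem?_map, pvRange_get?, if_neg hk, Option.map_none]
    · rw [if_neg (fun hc => hocc (by simp [pvOccB, hc]))]
      apply List.map_congr_left
      intro k _
      exact (pvLabA_succ_eq sl pl t k (fun hc => absurd hc hocc)).symm

theorem pvLabA_final (sl pl : List String) (hpl : pl ≠ []) (k : Nat) :
    pvLabA sl pl (sl.length + 1 - pl.length) k = pvLab sl pl k := by
  have hm : 0 < pl.length := by
    cases pl with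
    | nil => exact absurd rfl hpl
    | cons x xs => simp
  unfold pvLabA pvLab
  by_cases hk : pvOccB sl pl k = true
  · have := pvOccB_bound hpl hk
    rw [if_pos ⟨hk, by omega⟩, if_pos hk]
  · rw [if_neg (by rintro ⟨h, _⟩; exact hk h), if_neg hk]
    have e : (∃ i, i < sl.length + 1 - pl.length ∧ pvOccB sl pl i = true ∧ i < k ∧ k < i + pl.length)
        ↔ (∃ i, i < k ∧ pvOccB sl pl i = true ∧ k < i + pl.length) := by
      constructor
      · rintro ⟨i, _, ho, hik, hk2⟩; exact ⟨i, hik, ho, hk2⟩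
      · rintro ⟨i, hik, ho, hk2⟩
        have := pvOccB_bound hpl ho
        exact ⟨i, by omega, ho, hik, hk2⟩
    rw [if_congr e rfl rfl]

theorem pvCarry_spec (sl pl : List String) (hpl : pl ≠ []) (t : Nat) :
    (0 < pvCarry sl pl t → ∃ i, i < t ∧ pvOccB sl pl i = true ∧ i + pl.length = t + pvCarry sl pl t)
    ∧ (∀ i, i < t → pvOccB sl pl i = true → i + pl.length ≤ t + pvCarry sl pl t) := by
  have hm : 0 < pl.length := by
    cases pl with
    | nil => exact absurd rfl hpl
    | cons x xs => simp
  induction t with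
  | zero =>
    constructor
    · intro h; simp [pvCarry] at h
    · intro i hi; omega
  | succ t ih =>
    obtain ⟨ih1, ih2⟩ := ih
    by_cases hocc : pvOccB sl pl t = true
    · simp only [pvCarry, if_pos hocc]
      refine ⟨fun _ => ⟨t, by omega, hocc, by omega⟩, fun i hi hoi => ?_⟩
      have : i ≤ t := by omega
      omega
    · simp only [pvCarry, if_neg hocc]
      constructor
      · intro hpos
        obtain ⟨i, hi, ho, he⟩ := ih1 (by omega)
        exact ⟨i, by omega, ho, by omega⟩
      · intro i hi hoi
        rcases (by omega : i < t ∨ i = t) with h' | h'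
        · have := ih2 i h' hoi
          omega
        · exact absurd (h' ▸ hoi) hocc

theorem pvCarry_pos (sl pl : List String) (hpl : pl ≠ []) (t : Nat) :
    0 < pvCarry sl pl t ↔ ∃ i, i < t ∧ pvOccB sl pl i = true ∧ t < i + pl.length := by
  obtain ⟨h1, h2⟩ := pvCarry_spec sl pl hpl t
  constructor
  · intro hpos
    obtain ⟨i, hi, ho, he⟩ := h1 hpos
    exact ⟨i, hi, ho, by omega⟩
  · rintro ⟨i, hi, ho, hlt⟩
    have := h2 i hi ho
    omega

theorem pvBfold (sl pl : List String) (hpl : pl ≠ []) (t : Nat) :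
    (List.range t).foldl
      (fun (st : List String × Nat) (k : Nat) =>
        if (k : Int) ≤ (sl.length : Int) - (pl.length : Int) ∧ (sl.drop k).take pl.length = pl then (st.1 ++ ["B-APC"], pl.length - 1)
        else if 0 < st.2 then (st.1 ++ ["I-APC"], st.2 - 1)
        else (st.1 ++ ["O"], st.2))
      ([], 0)
    = ((List.range t).map (pvLab sl pl), pvCarry sl pl t) := by
  induction t with
  | zero => rfl
  | succ t ih =>
    rw [List.range_succ, List.foldl_append, List.foldl_cons, List.foldl_nil, ih,
        List.map_append]
    by_cases hocc : pvOccB sl pl t = true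
    · have hocc' : (sl.drop t).take pl.length = pl := by simpa [pvOccB] using hocc
      have hb := pvOccB_bound hpl hocc
      rw [if_pos ⟨by omega, hocc'⟩]
      have hB : pvLab sl pl t = "B-APC" := by unfold pvLab; rw [if_pos hocc]
      simp only [pvCarry, if_pos hocc, List.map_cons, List.map_nil, hB]
    · rw [if_neg (fun hc => hocc (by simp [pvOccB, hc.2]))]
      by_cases hc : 0 < pvCarry sl pl t
      · rw [if_pos hc]
        have hI : pvLab sl pl t = "I-APC" := by
          unfold pvLab
          rw [if_neg hocc, if_pos ((pvCarry_pos sl pl hpl t).mp hc)]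
        simp only [pvCarry, if_neg hocc, List.map_cons, List.map_nil, hI]
      · rw [if_neg hc]
        have hO : pvLab sl pl t = "O" := by
          unfold pvLab
          rw [if_neg hocc, if_neg (fun he => hc ((pvCarry_pos sl pl hpl t).mpr he))]
        have hc0 : pvCarry sl pl t = 0 := by omega
        simp only [pvCarry, if_neg hocc, List.map_cons, List.map_nil, hO, hc0]

-- ===== VERDICT (by name: the statement is the Claim_ definition above) =====
theorem generate_biolabels_single_spec : Claim_equal_generate_biolabels_single := by
  intro s a _
  unfold Spec_generate_biolabels_single
  by_cases hs : s = []
  · subst hs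
    simp [generate_biolabels_single, generate_biolabels_single_alt]
  · by_cases ha : a = []
    · subst ha
      simp [generate_biolabels_single, generate_biolabels_single_alt, hs]
    · have hpl : a.map PySem.Str.lower ≠ [] := by simpa using ha
      unfold generate_biolabels_single generate_biolabels_single_alt
      rw [if_neg (by tauto), if_neg hpl]
      have hlen1 : s.length = (s.map PySem.Str.lower).length := (List.length_map ..).symm
      have hlen2 : a.length = (a.map PySem.Str.lower).length := (List.length_map ..).symm
      rw [hlen1, hlen2, pvAfold _ _ hpl, pvBfold _ _ hpl]
      apply List.map_congr_left
      intro k _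
      exact pvLabA_final _ _ hpl k
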